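-- pv_equiv track=rewrite | github.com/Gazzamac10/McAecom | McA_GroupByParameter.py | ifequal
-- ===== SOURCE A (Python) =====
-- def ifequal(b,a):
-- 	indiceslist = []
-- 	for lA in a:
-- 		counter = 0
-- 		for lB in b:
-- 			if (lA == lB):
-- 				indiceslist.append(counter)
-- 			counter += 1
-- 	return indiceslist
-- ===== SOURCE B (Python) =====
-- def ifequal(b, a):
--     idx = {}
--     for i, v in enumerate(b):
--         idx.setdefault(v, []).append(i)
--     out = []
--     for lA in a:
--         out.extend(idx.get(lA, []))
--     return out
-- ===== Notes on version B (the rewrite author's own statement) =====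
-- stated objective: alternative
-- what changed: Replaced the nested scan of b for every element of a by a single pass that builds a hash map value -> list of b-indices, then extends the output per a-element by one dict lookup.
import Mathlib
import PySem

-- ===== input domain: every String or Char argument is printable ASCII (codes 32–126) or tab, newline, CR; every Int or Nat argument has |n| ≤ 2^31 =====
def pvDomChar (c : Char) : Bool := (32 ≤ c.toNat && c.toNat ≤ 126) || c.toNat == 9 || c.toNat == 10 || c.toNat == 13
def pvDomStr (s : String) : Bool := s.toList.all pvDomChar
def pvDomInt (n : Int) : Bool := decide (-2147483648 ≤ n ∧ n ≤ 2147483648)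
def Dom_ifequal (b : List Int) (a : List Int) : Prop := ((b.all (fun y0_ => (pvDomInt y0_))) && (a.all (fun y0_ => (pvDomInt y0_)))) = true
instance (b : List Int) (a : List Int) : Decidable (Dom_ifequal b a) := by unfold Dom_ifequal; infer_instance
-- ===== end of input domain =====

-- B replaces A's nested scan of b per a-element by a one-pass index (value -> list of b-indices) and per-element dict lookups (objective: alternative).

-- ===== PORT A =====
-- For each lA in a, scan b with a counter, appending the counter on equality.
def ifequal (b : List Int) (a : List Int) : List Int :=
  a.foldl
    (fun indiceslist lA =>
      (b.foldl
        (fun (p : List Int × Int) lB =>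
          ((if lA == lB then p.1 ++ [p.2] else p.1), p.2 + 1))
        (indiceslist, (0 : Int))).1)
    []

-- ===== PORT B =====
-- idx.setdefault(v, []).append(i): keyed list grows in place (insert overwrites keeping position).
def ifequalIdx (b : List Int) : PySem.Dict Int (List Int) :=
  (PySem.List.enumerate b).foldl
    (fun d p => d.insert p.2 (d.getD p.2 [] ++ [p.1]))
    PySem.Dict.empty

def ifequal_alt (b : List Int) (a : List Int) : List Int :=
  let idx := ifequalIdx b
  a.foldl (fun out lA => out ++ idx.getD lA []) []

-- ===== PRECONDITION & SPEC =====
def Spec_ifequal (b : List Int) (a : List Int) (out : List Int) : Prop := out = ifequal_alt b a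
instance (b : List Int) (a : List Int) (out : List Int) : Decidable (Spec_ifequal b a out) := by unfold Spec_ifequal; infer_instance

-- ===== CLAIM (what is proved, stated in full; the proofs are below) =====
def Claim_equal_ifequal : Prop := ∀ (b : List Int) (a : List Int), Dom_ifequal b a → Spec_ifequal b a (ifequal b a)

-- ===== LEMMAS AND PROOFS =====

-- the positions (counted from c) of v in b
def ifequalOcc (b : List Int) (v : Int) (c : Int) : List Int :=
  match b with
  | [] => []
  | x :: xs => (if v == x then [c] else []) ++ ifequalOcc xs v (c + 1)

theorem ifequal_inner (b : List Int) (v : Int) :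
    ∀ (p : List Int × Int),
      (b.foldl (fun (p : List Int × Int) lB =>
          ((if v == lB then p.1 ++ [p.2] else p.1), p.2 + 1)) p).1
        = p.1 ++ ifequalOcc b v p.2 := by
  induction b with
  | nil => intro p; simp [ifequalOcc]
  | cons x xs ih =>
      intro p
      rw [List.foldl_cons, ih]
      by_cases h : v = x
      · simp [ifequalOcc, h]
      · simp [ifequalOcc, h]

theorem ifequalIdx_getD (b : List Int) (v : Int) :
    ∀ (d : PySem.Dict Int (List Int)) (s : Int),
      ((PySem.List.enumerate b s).foldl
          (fun d p => d.insert p.2 (d.getD p.2 [] ++ [p.1])) d).getD v []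
        = d.getD v [] ++ ifequalOcc b v s := by
  induction b with
  | nil => intro d s; simp [PySem.List.enumerate_nil, ifequalOcc]
  | cons x xs ih =>
      intro d s
      rw [PySem.List.enumerate_cons]
      simp only [List.foldl_cons, ifequalOcc]
      rw [ih]
      by_cases h : v = x
      · subst h
        rw [PySem.Dict.getD_insert_self]
        simp
      · rw [PySem.Dict.getD_insert_of_ne (hne := h)]
        simp [h]

theorem ifequalIdx_spec (b : List Int) (v : Int) :
    (ifequalIdx b).getD v [] = ifequalOcc b v 0 := by
  unfold ifequalIdx
  rw [ifequalIdx_getD]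
  simp [PySem.Dict.getD, PySem.Dict.get?, PySem.Dict.empty]

-- ===== VERDICT (by name: the statement is the Claim_ definition above) =====
theorem ifequal_spec : Claim_equal_ifequal := by
  intro b a hd; clear hd
  unfold Spec_ifequal ifequal ifequal_alt
  induction a using List.reverseRecOn with
  | nil => rfl
  | append_singleton xs x ih =>
      simp only [List.foldl_append, List.foldl_cons, List.foldl_nil]
      rw [ih, ifequal_inner, ifequalIdx_spec]
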